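-- pv_equiv track=rewrite | github.com/dengpris/advent-of-code | 2025/day2/day2.py | check_invalid
-- ===== SOURCE A (Python) =====
-- def check_invalid(start, end, substr, string):
--     # Return early if step does not evenly split
--     if (len(string) % (end - start)):
--         return False
--     # Base condition
--     if end > len(string):
--         return True
--     # Start condition
--     if (start == 0):
--         return check_invalid(end, end + (end-start), string[:end], string)
--     # Fail condition
--     if string[start:end] != substr:
--         return False
--     # Recursion
--     return check_invalid(end, end + len(substr), substr, string)
-- ===== SOURCE B (Python) =====
-- def check_invalid(start, end, substr, string):
--     n = len(string)
--     if n % (end - start):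
--         return False
--     if end > n:
--         return True
--     if start == 0:
--         substr = string[:end]
--     elif string[start:end] != substr:
--         return False
--     k = len(substr)
--     if n % k:
--         return False
--     return all(string[s:s + k] == substr for s in range(end, n - k + 1, k))
-- ===== Notes on version B (the rewrite author's own statement) =====
-- stated objective: simpler
-- what changed: Replaced A's tail recursion with a single straight-line pass: the initial guards run once, then one all() over range(end, n-k+1, k) compares every k-sized window with the block.
-- outside the precondition, e.g. on check_invalid(0, -1, '', ''): A raises ZeroDivisionError, B raises ZeroDivisionError
import Mathlib
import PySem

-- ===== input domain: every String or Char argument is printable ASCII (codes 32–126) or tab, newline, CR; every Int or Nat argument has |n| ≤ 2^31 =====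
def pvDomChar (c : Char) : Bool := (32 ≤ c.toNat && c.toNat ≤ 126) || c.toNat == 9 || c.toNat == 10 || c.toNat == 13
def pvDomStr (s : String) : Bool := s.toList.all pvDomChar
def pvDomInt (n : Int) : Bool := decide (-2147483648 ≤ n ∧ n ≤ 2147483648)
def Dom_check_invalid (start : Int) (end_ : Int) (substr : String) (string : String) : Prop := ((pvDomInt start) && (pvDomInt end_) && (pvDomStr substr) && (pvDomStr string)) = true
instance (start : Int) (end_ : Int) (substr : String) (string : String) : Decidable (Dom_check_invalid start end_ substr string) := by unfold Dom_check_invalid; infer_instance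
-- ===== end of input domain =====

-- B replaces A's tail recursion by a straight-line guard pass followed by a single
-- `all` over range(end, n-k+1, k) that compares each k-sized window with the block
-- (objective: simpler — no recursion, one closed comprehension).

-- ===== PORT A =====
-- A is tail-recursive and does not terminate on all inputs (Pre_ excludes those);
-- the fuel is an upper bound on A's recursion depth wherever Pre_ holds, so on
-- Pre_ the port computes exactly A's recursion, step for step.
def check_invalid_fuel (fuel : Nat) (start : Int) (end_ : Int) (substr : String) (string : String) : Bool :=
  match fuel with
  | 0 => false
  | fuel + 1 =>
    if PySem.Int.mod (PySem.Str.len string) (end_ - start) ≠ 0 then false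
    else if end_ > PySem.Str.len string then true
    else if start = 0 then
      check_invalid_fuel fuel end_ (end_ + (end_ - start)) (PySem.Str.slice string none (some end_)) string
    else if PySem.Str.slice string (some start) (some end_) ≠ substr then false
    else check_invalid_fuel fuel end_ (end_ + PySem.Str.len substr) substr string

def check_invalid (start : Int) (end_ : Int) (substr : String) (string : String) : Bool :=
  check_invalid_fuel (string.toList.length + end_.natAbs + 3) start end_ substr string

-- ===== PORT B =====
def check_invalid_alt (start : Int) (end_ : Int) (substr : String) (string : String) : Bool :=
  let n := PySem.Str.len string
  if PySem.Int.mod n (end_ - start) ≠ 0 then false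
  else if end_ > n then true
  else if start ≠ 0 ∧ PySem.Str.slice string (some start) (some end_) ≠ substr then false
  else
    let substr' := if start = 0 then PySem.Str.slice string none (some end_) else substr
    let k := PySem.Str.len substr'
    if PySem.Int.mod n k ≠ 0 then false
    else (PySem.List.pyRange end_ (n - k + 1) k).all
      (fun s => PySem.Str.slice string (some s) (some (s + k)) == substr')

-- ===== PRECONDITION & SPEC =====
-- Pre_ excludes exactly the inputs on which A raises: end == start (ZeroDivisionError),
-- the inputs where an empty substr matches an empty window so the step becomes zero
-- (ZeroDivisionError one call later, e.g. (0, -1, '', '')), and the start == 0,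
-- end ≤ -len(string) corner where the same happens after the descending first step.
def Pre_check_invalid (start : Int) (end_ : Int) (substr : String) (string : String) : Prop :=
  end_ ≠ start ∧
    (PySem.Int.mod (PySem.Str.len string) (end_ - start) ≠ 0 ∨
     end_ > PySem.Str.len string ∨
     (start = 0 ∧ (0 < end_ ∨ (-(PySem.Str.len string) < end_ ∧ end_ < 0))) ∨
     (start ≠ 0 ∧ (substr ≠ "" ∨ PySem.Str.slice string (some start) (some end_) ≠ substr)))
instance (start : Int) (end_ : Int) (substr : String) (string : String) : Decidable (Pre_check_invalid start end_ substr string) := by unfold Pre_check_invalid; infer_instance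

def pvWitness_check_invalid : Int × Int × String × String := (0, 1, "", "aa")

def Spec_check_invalid (start : Int) (end_ : Int) (substr : String) (string : String) (out : Bool) : Prop := out = check_invalid_alt start end_ substr string
instance (start : Int) (end_ : Int) (substr : String) (string : String) (out : Bool) : Decidable (Spec_check_invalid start end_ substr string out) := by unfold Spec_check_invalid; infer_instance

-- ===== CLAIM (what is proved, stated in full; the proofs are below) =====
def Claim_equal_check_invalid : Prop := ∀ (start : Int) (end_ : Int) (substr : String) (string : String), Dom_check_invalid start end_ substr string → Pre_check_invalid start end_ substr string → Spec_check_invalid start end_ substr string (check_invalid start end_ substr string)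

-- ===== LEMMAS AND PROOFS =====

theorem slice_stop_zero (s : String) (a : Int) : PySem.Str.slice s (some a) (some 0) = "" := by
  apply String.toList_inj.mp
  rw [PySem.Str.toList_slice]
  show PySem.List.slice s.toList (some a) (some 0) = ([] : List Char)
  have h := PySem.List.length_slice s.toList a 0
  have h0 : PySem.List.clampIdx s.toList.length 0 = 0 := by simp [PySem.List.clampIdx]
  rw [h0] at h
  exact List.eq_nil_of_length_eq_zero (by omega)

theorem len_slice_prefix (s : String) (e : Int) (h0 : 0 < e) (hle : e ≤ PySem.Str.len s) :
    PySem.Str.len (PySem.Str.slice s none (some e)) = e := by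
  rw [PySem.Str.len_eq, PySem.Str.toList_slice]
  show ((PySem.List.slice s.toList none (some e)).length : Int) = e
  rw [PySem.List.slice_to _ (le_of_lt h0), List.length_take]
  rw [PySem.Str.len_eq] at hle
  omega

theorem ne_empty_of_len_pos (s : String) (h : 0 < PySem.Str.len s) : s ≠ "" := by
  intro he; subst he; simp [PySem.Str.len_eq] at h

theorem pyRange_pos_nil (a b k : Int) (hk : 0 < k) (hba : b ≤ a) :
    PySem.List.pyRange a b k = [] := by
  rw [PySem.List.pyRange_of_pos a b hk]
  rw [if_neg (by omega)]
  simp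

theorem pyRange_pos_cons (a b k : Int) (hk : 0 < k) (hab : a < b) :
    PySem.List.pyRange a b k = a :: PySem.List.pyRange (a + k) b k := by
  rw [PySem.List.pyRange_of_pos a b hk, PySem.List.pyRange_of_pos (a+k) b hk, if_pos hab]
  by_cases h2 : a + k < b
  · rw [if_pos h2]
    have key : (b - a + k - 1) / k = (b - (a + k) + k - 1) / k + 1 := by
      have := Int.add_mul_ediv_right (b - (a+k) + k - 1) 1 (by omega : k ≠ 0)
      rw [one_mul] at this
      rw [← this]; ring_nf
    have hpos : 0 ≤ (b - (a+k) + k - 1) / k := Int.ediv_nonneg (by omega) (by omega)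
    have : ((b - a + k - 1) / k).toNat = ((b - (a+k) + k - 1) / k).toNat + 1 := by omega
    rw [this, List.range_succ_eq_map, List.map_cons, List.map_map]
    congr 1
    · simp
    · apply List.map_congr_left
      intro x hx
      simp [Function.comp, Nat.succ_eq_add_one]

      ring
  · rw [if_neg h2]
    have h1 : 1 * k ≤ b - a + k - 1 := by omega
    have hlo : 1 ≤ (b - a + k - 1) / k := by
      exact (Int.le_ediv_iff_mul_le hk).mpr h1
    have hhi : (b - a + k - 1) / k < 2 := by
      apply Int.ediv_lt_iff_lt_mul hk |>.mpr; omega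
    have : ((b - a + k - 1) / k).toNat = 1 := by omega
    rw [this]
    simp


theorem slice_empty_of_le_neg (s : String) (a b : Int) (h : b ≤ a) (ha : a < 0) :
    PySem.Str.slice s (some a) (some b) = "" := by
  apply String.toList_inj.mp
  rw [PySem.Str.toList_slice]
  show PySem.List.slice s.toList (some a) (some b) = ([] : List Char)
  have hl := PySem.List.length_slice s.toList a b
  have key : ∀ (i : Int), PySem.List.clampIdx s.toList.length i =
      if i < 0 then (if (s.toList.length : Int) + i < 0 then 0 else ((s.toList.length : Int) + i).toNat)
      else min i.toNat s.toList.length := fun i => rfl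
  have hmono : PySem.List.clampIdx s.toList.length b ≤ PySem.List.clampIdx s.toList.length a := by
    rw [key a, key b]
    clear hl
    split_ifs <;> omega
  exact List.eq_nil_of_length_eq_zero (by omega)

theorem len_slice_prefix_neg (s : String) (e : Int) (h1 : -(PySem.Str.len s) ≤ e) (h2 : e < 0) :
    PySem.Str.len (PySem.Str.slice s none (some e)) = PySem.Str.len s + e := by
  have hcast : e = -(((-e).toNat : Nat) : Int) := by omega
  rw [PySem.Str.len_eq, PySem.Str.toList_slice]
  show ((PySem.List.slice s.toList none (some e)).length : Int) = _
  rw [hcast, PySem.List.slice_to_neg_natCast s.toList (-e).toNat (by omega)]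
  rw [List.length_take, PySem.Str.len_eq] at *
  omega

theorem chain_eq (string substr : String) (hsub : substr ≠ "")
    (hmod : PySem.Int.mod (PySem.Str.len string) (PySem.Str.len substr) = 0) :
    ∀ (fuel : Nat) (s : Int), s ≠ 0 →
      (PySem.Str.len string + 1 - s).toNat < fuel →
      check_invalid_fuel fuel s (s + PySem.Str.len substr) substr string =
        (PySem.List.pyRange s (PySem.Str.len string - PySem.Str.len substr + 1) (PySem.Str.len substr)).all
          (fun t => PySem.Str.slice string (some t) (some (t + PySem.Str.len substr)) == substr) := by
  intro fuel
  induction fuel with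
  | zero => intro s _ hf; omega
  | succ fuel ih =>
    intro s hs hf
    set n := PySem.Str.len string with hn
    set k := PySem.Str.len substr with hk
    have hk1 : 1 ≤ k := by
      rw [hk, PySem.Str.len_eq]
      have : substr.toList ≠ [] := by
        intro h; apply hsub; apply String.toList_inj.mp; simpa using h
      have := List.length_pos_of_ne_nil this
      omega
    rw [check_invalid_fuel]
    have e1 : s + k - s = k := by ring
    rw [e1, if_neg (not_ne_iff.mpr hmod)]
    by_cases hgt : s + k > n
    · rw [if_pos hgt, pyRange_pos_nil _ _ _ (by omega) (by omega)]
      simp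
    · rw [if_neg hgt, if_neg hs]
      rw [pyRange_pos_cons _ _ _ (by omega) (by omega), List.all_cons]
      by_cases heq : PySem.Str.slice string (some s) (some (s + k)) = substr
      · rw [if_neg (by simpa using heq)]
        have hsk : s + k ≠ 0 := by
          intro h0
          rw [h0] at heq
          rw [slice_stop_zero] at heq
          exact hsub heq.symm
        have := ih (s + k) hsk (by omega)
        rw [this]
        simp [heq]
      · rw [if_pos (by simpa using heq)]
        simp [heq]


theorem prefix_pos_case (end_ : Int) (string : String)
    (hm : PySem.Int.mod (PySem.Str.len string) (end_ - 0) = 0)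
    (hgt : ¬end_ > PySem.Str.len string) (hpos : 0 < end_) :
    check_invalid_fuel (string.toList.length + end_.natAbs + 2) end_ (end_ + (end_ - 0))
        (PySem.Str.slice string none (some end_)) string =
      (if PySem.Int.mod (PySem.Str.len string)
            (PySem.Str.len (PySem.Str.slice string none (some end_))) ≠ 0 then false
       else
         (PySem.List.pyRange end_
             (PySem.Str.len string - PySem.Str.len (PySem.Str.slice string none (some end_)) + 1)
             (PySem.Str.len (PySem.Str.slice string none (some end_)))).all
           fun s =>
             PySem.Str.slice string (some s)
                 (some (s + PySem.Str.len (PySem.Str.slice string none (some end_)))) ==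
               PySem.Str.slice string none (some end_)) := by
  have hnlen : PySem.Str.len string = (string.toList.length : Int) := PySem.Str.len_eq string
  have hle : end_ ≤ PySem.Str.len string := le_of_not_gt hgt
  have hklen : PySem.Str.len (PySem.Str.slice string none (some end_)) = end_ :=
    len_slice_prefix string end_ hpos hle
  have hsub' : PySem.Str.slice string none (some end_) ≠ "" :=
    ne_empty_of_len_pos _ (by rw [hklen]; exact hpos)
  have hmod' : PySem.Int.mod (PySem.Str.len string)
      (PySem.Str.len (PySem.Str.slice string none (some end_))) = 0 := by
    rw [hklen]; simpa using hm
  have e2 : end_ + (end_ - 0) = end_ + PySem.Str.len (PySem.Str.slice string none (some end_)) := by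
    rw [hklen]; ring
  rw [e2]
  rw [chain_eq string _ hsub' hmod' _ end_ (by omega) (by omega)]
  rw [if_neg (not_ne_iff.mpr hmod')]

theorem prefix_neg_case (end_ : Int) (string : String)
    (hm : PySem.Int.mod (PySem.Str.len string) (end_ - 0) = 0)
    (hgt : ¬end_ > PySem.Str.len string)
    (hgn : -(PySem.Str.len string) < end_) (hlt0 : end_ < 0) :
    check_invalid_fuel (string.toList.length + end_.natAbs + 2) end_ (end_ + (end_ - 0))
        (PySem.Str.slice string none (some end_)) string =
      (if PySem.Int.mod (PySem.Str.len string)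
            (PySem.Str.len (PySem.Str.slice string none (some end_))) ≠ 0 then false
       else
         (PySem.List.pyRange end_
             (PySem.Str.len string - PySem.Str.len (PySem.Str.slice string none (some end_)) + 1)
             (PySem.Str.len (PySem.Str.slice string none (some end_)))).all
           fun s =>
             PySem.Str.slice string (some s)
                 (some (s + PySem.Str.len (PySem.Str.slice string none (some end_)))) ==
               PySem.Str.slice string none (some end_)) := by
  have hnlen : PySem.Str.len string = (string.toList.length : Int) := PySem.Str.len_eq string
  have hn0 : (0 : Int) ≤ PySem.Str.len string := by rw [hnlen]; exact_mod_cast Int.natCast_nonneg _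
  set s' := PySem.Str.slice string none (some end_) with hs'
  have hklen : PySem.Str.len s' = PySem.Str.len string + end_ :=
    len_slice_prefix_neg string end_ (by omega) hlt0
  have hsub' : s' ≠ "" := ne_empty_of_len_pos _ (by omega)
  have hm0 : PySem.Int.mod (PySem.Str.len string) end_ = 0 := by simpa using hm
  rw [show string.toList.length + end_.natAbs + 2 = (string.toList.length + end_.natAbs + 1) + 1 from rfl]
  rw [check_invalid_fuel]
  rw [show end_ + (end_ - 0) - end_ = end_ from by ring]
  rw [if_neg (not_ne_iff.mpr hm0)]
  rw [if_neg (show ¬(end_ + (end_ - 0) > PySem.Str.len string) from by omega)]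
  rw [if_neg (show end_ ≠ 0 from by omega)]
  have hemp : PySem.Str.slice string (some end_) (some (end_ + (end_ - 0))) = "" :=
    slice_empty_of_le_neg string end_ (end_ + (end_ - 0)) (by omega) hlt0
  rw [if_pos (show PySem.Str.slice string (some end_) (some (end_ + (end_ - 0))) ≠ s' from by
    rw [hemp]; exact fun h => hsub' h.symm)]
  by_cases hmk : PySem.Int.mod (PySem.Str.len string) (PySem.Str.len s') = 0
  · rw [if_neg (not_ne_iff.mpr hmk)]
    symm
    rw [List.all_eq_false]
    refine ⟨-(PySem.Str.len s'), ?_, ?_⟩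
    · rw [PySem.List.mem_pyRange_iff_of_pos (by omega)]
      have hdvd : PySem.Str.len s' ∣ PySem.Str.len string :=
        (PySem.Int.mod_eq_zero_iff_dvd _ _).mp hmk
      obtain ⟨q, hq⟩ := hdvd
      have hq2 : 2 ≤ q := by
        by_contra hq1
        have hq1' : q ≤ 1 := by omega
        have h1 : PySem.Str.len s' * q ≤ PySem.Str.len s' * 1 :=
          mul_le_mul_of_nonneg_left hq1' (by omega)
        rw [← hq, mul_one] at h1
        omega
      have h2 : PySem.Str.len s' * 2 ≤ PySem.Str.len s' * q :=
        mul_le_mul_of_nonneg_left hq2 (by omega)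
      rw [← hq] at h2
      refine ⟨by omega, by omega, ⟨q - 2, ?_⟩⟩
      rw [mul_sub, ← hq]
      omega
    · rw [show -(PySem.Str.len s') + PySem.Str.len s' = 0 from by ring]
      rw [slice_stop_zero]
      simp only [beq_iff_eq]
      exact fun h => hsub' h.symm
  · rw [if_pos hmk]

theorem main (start : Int) (end_ : Int) (substr : String) (string : String)
    (hpre : Pre_check_invalid start end_ substr string) :
    check_invalid start end_ substr string = check_invalid_alt start end_ substr string := by
  obtain ⟨hne, hcase⟩ := hpre
  have hnlen : PySem.Str.len string = (string.toList.length : Int) := PySem.Str.len_eq string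
  unfold check_invalid check_invalid_alt
  simp only []
  rw [show string.toList.length + end_.natAbs + 3 = (string.toList.length + end_.natAbs + 2) + 1 from rfl]
  rw [check_invalid_fuel]
  by_cases hm : PySem.Int.mod (PySem.Str.len string) (end_ - start) = 0
  · rw [if_neg (not_ne_iff.mpr hm), if_neg (not_ne_iff.mpr hm)]
    by_cases hgt : end_ > PySem.Str.len string
    · rw [if_pos hgt, if_pos hgt]
    · rw [if_neg hgt, if_neg hgt]
      rcases hcase with hm' | hgt' | ⟨h0, hpe⟩ | ⟨hs0, hdisj⟩
      · exact absurd hm hm'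
      · exact absurd hgt' hgt
      · -- start = 0
        subst h0
        rw [if_pos rfl, if_pos rfl]
        rw [if_neg (by intro h; exact h.1 rfl)]
        rcases hpe with hpos | ⟨hgn, hlt0⟩
        · exact prefix_pos_case end_ string hm hgt hpos
        · exact prefix_neg_case end_ string hm hgt hgn hlt0
      · -- start ≠ 0
        rw [if_neg hs0]
        by_cases hsl : PySem.Str.slice string (some start) (some end_) = substr
        · rw [if_neg (by simpa using hsl)]
          rw [if_neg (by intro h; exact h.2 hsl)]
          have hsub : substr ≠ "" := by
            rcases hdisj with h | h
            · exact h
            · exact absurd hsl h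
          have hend0 : end_ ≠ 0 := by
            intro h0; rw [h0] at hsl
            rw [slice_stop_zero] at hsl
            exact hsub hsl.symm
          rw [if_neg hs0]
          by_cases hmk : PySem.Int.mod (PySem.Str.len string) (PySem.Str.len substr) = 0
          · rw [chain_eq string substr hsub hmk _ end_ hend0 (by omega)]
            rw [if_neg (not_ne_iff.mpr hmk)]
          · rw [show string.toList.length + end_.natAbs + 2 = (string.toList.length + end_.natAbs + 1) + 1 from rfl]
            rw [check_invalid_fuel]
            have e3 : end_ + PySem.Str.len substr - end_ = PySem.Str.len substr := by ring
            rw [e3, if_pos hmk, if_pos hmk]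
        · rw [if_pos (by simpa using hsl), if_pos ⟨hs0, hsl⟩]
  · rw [if_pos hm, if_pos hm]

-- ===== VERDICT (by name: the statement is the Claim_ definition above) =====
theorem check_invalid_spec : Claim_equal_check_invalid := by
  intro start end_ substr string _ hpre
  exact main start end_ substr string hpre
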